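-- pv_equiv track=rewrite | github.com/JavierL1/IVUS-Sequence-Detection | code/ivus/data/postprocessing.py | sequence_fourier_padding
-- ===== SOURCE A (Python) =====
-- def sequence_fourier_padding(sequence, size):
--     seq_len = len(sequence)
--     if seq_len >= size:
--         return sequence[-size:]
--     else:
--         repeats = size // seq_len
--         remainder = size % seq_len
--         output = []
--         if remainder != 0:
--             output.extend(sequence[-remainder:])
--         for i in range(repeats):
--             output.extend(sequence)
--         return output
-- ===== SOURCE B (Python) =====
-- def sequence_fourier_padding(sequence, size):
--     seq_len = len(sequence)
--     if seq_len >= size: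
--         return sequence[-size:]
--     # output position j holds the element of the infinitely tiled sequence
--     # ending at the last element, found by modular arithmetic
--     return [sequence[(j - size) % seq_len] for j in range(size)]
-- ===== Notes on version B (the rewrite author's own statement) =====
-- stated objective: simpler
-- what changed: The else branch's remainder slice plus repeat/extend loop is replaced by a single comprehension mapping each output position to a source index by modular arithmetic.
import Mathlib
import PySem

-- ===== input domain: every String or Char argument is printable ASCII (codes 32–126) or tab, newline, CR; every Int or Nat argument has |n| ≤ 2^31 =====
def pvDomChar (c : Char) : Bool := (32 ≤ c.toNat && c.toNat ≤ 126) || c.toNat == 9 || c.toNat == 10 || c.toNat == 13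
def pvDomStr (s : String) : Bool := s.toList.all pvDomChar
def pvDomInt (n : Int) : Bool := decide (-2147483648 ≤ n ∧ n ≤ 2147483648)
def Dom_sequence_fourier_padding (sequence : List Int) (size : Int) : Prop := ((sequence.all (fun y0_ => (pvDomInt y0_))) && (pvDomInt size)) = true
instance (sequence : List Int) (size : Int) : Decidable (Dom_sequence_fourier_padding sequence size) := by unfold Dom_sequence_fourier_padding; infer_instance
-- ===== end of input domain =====

-- B replaces the remainder-slice + repeat loop of the else branch by a single
-- modular-indexing map over the output positions (objective: simpler).

-- ===== PORT A =====
def sequence_fourier_padding (sequence : List Int) (size : Int) : List Int :=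
  let seq_len : Int := sequence.length
  if seq_len ≥ size then
    PySem.List.slice sequence (some (-size)) none
  else
    let repeats := PySem.Int.floordiv size seq_len
    let remainder := PySem.Int.mod size seq_len
    let output : List Int := []
    let output := if remainder ≠ 0 then output ++ PySem.List.slice sequence (some (-remainder)) none else output
    (PySem.List.pyRange 0 repeats 1).foldl (fun acc _ => acc ++ sequence) output

-- ===== PORT B =====
def sequence_fourier_padding_alt (sequence : List Int) (size : Int) : List Int :=
  let seq_len : Int := sequence.length
  if seq_len ≥ size then
    PySem.List.slice sequence (some (-size)) none
  else
    -- sequence[(j - size) % seq_len]: the index is always in range here (0 < seq_len),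
    -- so pyGetD's default is never used
    (PySem.List.pyRange 0 size 1).map
      (fun j => PySem.List.pyGetD sequence (PySem.Int.mod (j - size) seq_len) 0)

-- ===== PRECONDITION & SPEC =====
-- Pre_ excludes exactly the inputs where A raises ZeroDivisionError (empty sequence with size > 0)
def Pre_sequence_fourier_padding (sequence : List Int) (size : Int) : Prop :=
  sequence ≠ [] ∨ size ≤ 0
instance (sequence : List Int) (size : Int) : Decidable (Pre_sequence_fourier_padding sequence size) := by unfold Pre_sequence_fourier_padding; infer_instance
def pvWitness_sequence_fourier_padding : List Int × Int := ([1, 2, 3], 5)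
def Spec_sequence_fourier_padding (sequence : List Int) (size : Int) (out : List Int) : Prop := out = sequence_fourier_padding_alt sequence size
instance (sequence : List Int) (size : Int) (out : List Int) : Decidable (Spec_sequence_fourier_padding sequence size out) := by unfold Spec_sequence_fourier_padding; infer_instance

-- ===== CLAIM (what is proved, stated in full; the proofs are below) =====
def Claim_equal_sequence_fourier_padding : Prop := ∀ (sequence : List Int) (size : Int), Dom_sequence_fourier_padding sequence size → Pre_sequence_fourier_padding sequence size → Spec_sequence_fourier_padding sequence size (sequence_fourier_padding sequence size)

-- ===== LEMMAS AND PROOFS =====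

-- the repeat loop appends `l.length` copies of `xs` to `init`
theorem foldl_append_replicate {α : Type} (xs : List α) :
    ∀ (l : List Int) (init : List α),
      l.foldl (fun acc _ => acc ++ xs) init = init ++ (List.replicate l.length xs).flatten := by
  intro l
  induction l with
  | nil => intro init; simp
  | cons a t ih => intro init; simp [List.foldl_cons, ih, List.replicate_succ]

-- indexing the flattening of q copies of xs is indexing xs modulo its length
theorem getElem_flatten_replicate {α : Type} (xs : List α) (hx : 0 < xs.length) :
    ∀ (q i : Nat) (h : i < ((List.replicate q xs).flatten).length)
      (h2 : i % xs.length < xs.length),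
      ((List.replicate q xs).flatten)[i] = xs[i % xs.length] := by
  intro q
  induction q with
  | zero => intro i h _; simp at h
  | succ k ih =>
    intro i h h2
    have he : (List.replicate (k + 1) xs).flatten = xs ++ (List.replicate k xs).flatten := by
      rw [List.replicate_succ, List.flatten_cons]
    have hlen : (List.replicate (k + 1) xs).flatten.length
        = xs.length + (List.replicate k xs).flatten.length := by
      rw [he, List.length_append]
    rw [List.getElem_of_eq he]
    by_cases hi : i < xs.length
    · rw [List.getElem_append_left hi]
      congr 1
      exact (Nat.mod_eq_of_lt hi).symm
    · rw [List.getElem_append_right (by omega)]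
      rw [ih (i - xs.length) (by omega) (Nat.mod_lt _ hx)]
      congr 1
      conv_rhs => rw [← Nat.sub_add_cancel (Nat.le_of_not_lt hi)]
      rw [Nat.add_mod_right]

-- the length of q flattened copies
theorem length_flatten_replicate {α : Type} (xs : List α) (q : Nat) :
    ((List.replicate q xs).flatten).length = q * xs.length := by
  induction q with
  | zero => simp
  | succ k ih =>
    rw [List.replicate_succ, List.flatten_cons, List.length_append, ih]
    ring

-- ===== VERDICT (by name: the statement is the Claim_ definition above) =====
theorem sequence_fourier_padding_spec : Claim_equal_sequence_fourier_padding := by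
  unfold Claim_equal_sequence_fourier_padding
  intro sequence size _ hpre
  unfold Spec_sequence_fourier_padding sequence_fourier_padding sequence_fourier_padding_alt
  by_cases hge : (sequence.length : Int) ≥ size
  · simp [hge]
  · simp only [hge, if_false]
    -- else branch: 0 < len < size
    have hn : 0 < sequence.length := by
      rcases hpre with h | h
      · exact List.length_pos_of_ne_nil h
      · omega
    obtain ⟨s, hs⟩ : ∃ s : Nat, size = (s : Int) := ⟨size.toNat, by omega⟩
    have hns : sequence.length < s := by omega
    subst hs
    rw [PySem.Int.floordiv_natCast, PySem.Int.mod_natCast]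
    obtain ⟨q, hq⟩ : ∃ q, q = s / sequence.length := ⟨_, rfl⟩
    obtain ⟨r, hr⟩ : ∃ r, r = s % sequence.length := ⟨_, rfl⟩
    rw [← hq, ← hr]
    have hrn : r < sequence.length := hr ▸ Nat.mod_lt _ hn
    have hqr : q * sequence.length + r = s := by
      rw [hq, hr, Nat.mul_comm]; exact Nat.div_add_mod s sequence.length
    -- A side: turn the foldl into replicate-flatten
    rw [foldl_append_replicate]
    have hlenq : (PySem.List.pyRange 0 (q : Int) 1).length = q := by
      simp [PySem.List.pyRange_zero_natCast]
    rw [hlenq]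
    -- B side: pyRange 0 s 1 = (range s).map cast
    rw [PySem.List.pyRange_zero_natCast, List.map_map]
    -- now prove the two lists equal elementwise
    apply List.ext_getElem
    · rw [List.length_append, List.length_map, List.length_range,
        length_flatten_replicate]
      by_cases hr0 : r = 0
      · rw [if_neg (by simp [hr0])]
        simp only [List.length_nil]
        omega
      · rw [if_pos (by exact_mod_cast hr0), List.nil_append,
          PySem.List.slice_from_neg_natCast sequence r (by omega), List.length_drop]
        omega
    · intro j hj1 hj2
      have hjs : j < s := by simpa using hj2
      -- RHS element: evaluate the modular index
      simp only [List.getElem_map, List.getElem_range, Function.comp_apply]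
      have hsint : (s : Int) = (sequence.length : Int) * ((q : Int) + 1) + ((r : Int) - sequence.length) := by
        have : ((q * sequence.length + r : Nat) : Int) = (s : Nat) := by exact_mod_cast hqr
        push_cast at this
        linarith
      have hmod : PySem.Int.mod ((j : Int) - (s : Int)) ((sequence.length : Int)) =
          (((j + (sequence.length - r)) % sequence.length : Nat) : Int) := by
        rw [PySem.Int.mod_eq_emod_of_pos (by omega : (0 : Int) < (sequence.length : Int))]
        have h1 : (j : Int) - (s : Int)
            = ((j + (sequence.length - r) : Nat) : Int) - (sequence.length : Int) * ((q : Int) + 1) := by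
          rw [hsint]
          push_cast [Nat.cast_sub hrn.le]
          ring
        rw [h1, Int.sub_mul_emod_self_left]
        push_cast
        rfl
      rw [hmod, PySem.List.pyGetD_eq_getElem _ _ (by positivity)
        (by exact_mod_cast Nat.mod_lt (j + (sequence.length - r)) hn)]
      have htn : ((((j + (sequence.length - r)) % sequence.length : Nat) : Int)).toNat
          = (j + (sequence.length - r)) % sequence.length := Int.toNat_natCast _
      -- LHS element
      by_cases hr0 : r = 0
      · rw [List.getElem_of_eq (by rw [if_neg (by simp [hr0]), List.nil_append]) hj1]
        rw [getElem_flatten_replicate sequence hn _ _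
          (by rw [if_neg (by simp [hr0])] at hj1; simpa using hj1) (Nat.mod_lt _ hn)]
        congr 1
        rw [htn]
        conv_lhs => rw [← Nat.add_mod_right j sequence.length]
        congr 1
        omega
      · have hif : (if (r : Int) ≠ 0 then ([] : List Int) ++ PySem.List.slice sequence (some (-(r : Int))) none else []) = sequence.drop (sequence.length - r) := by
          rw [if_pos (by exact_mod_cast hr0), List.nil_append,
            PySem.List.slice_from_neg_natCast sequence r (by omega)]
        rw [List.getElem_of_eq (by rw [hif]) hj1]
        have hj1' : j < (sequence.drop (sequence.length - r) ++ (List.replicate q sequence).flatten).length := by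
          rw [← hif]; exact hj1
        have hlend : (sequence.drop (sequence.length - r)).length = r := by
          rw [List.length_drop]; omega
        by_cases hjr : j < r
        · rw [List.getElem_append_left (by omega)]
          rw [List.getElem_drop]
          congr 1
          rw [htn, Nat.mod_eq_of_lt (by omega)]
          omega
        · rw [List.getElem_append_right (by omega)]
          rw [getElem_flatten_replicate sequence hn _ _
            (by
              rw [List.length_append, hlend, length_flatten_replicate] at hj1'
              rw [hlend, length_flatten_replicate]
              omega)
            (Nat.mod_lt _ hn)]
          congr 1
          rw [htn, hlend]
          have : j + (sequence.length - r) = (j - r) + sequence.length := by omega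
          rw [this, Nat.add_mod_right]
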